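-- pv_equiv track=rewrite | github.com/lixiang2017/leetcode | leetcode-cn/1447.0_Simplified_Fractions.py | simplifiedFractions
-- ===== SOURCE A (Python) =====
-- from typing import List
--
-- def simplifiedFractions(n: int) -> List[str]:
--     ans = []
--
--     def gcd(x, y):
--         if x == 0:
--             return y
--         return gcd(y % x, x)
--
--     for i in range(2, n + 1):
--         for j in range(1, i):
--             # j / i
--             if gcd(i, j) == 1:
--                 ans.append(str(j) + '/' + str(i))
--
--     return ans
-- ===== SOURCE B (Python) =====
-- def simplifiedFractions(n):
--     # per-denominator sieve: mark every j < i sharing a divisor d >= 2 with i,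
--     # then collect the unmarked numerators (no per-pair gcd)
--     ans = []
--     for i in range(2, n + 1):
--         mark = [False] * i
--         for d in range(2, i):
--             if i % d == 0:
--                 for m in range(d, i, d):
--                     mark[m] = True
--         for j in range(1, i):
--             if not mark[j]:
--                 ans.append(str(j) + '/' + str(i))
--     return ans
-- ===== Notes on version B (the rewrite author's own statement) =====
-- stated objective: alternative
-- what changed: Replaces the per-pair recursive-gcd coprimality test by a per-denominator sieve: for each i it marks the multiples of every divisor d of i in a boolean array and then collects the unmarked numerators, so no gcd is ever computed.
import Mathlib
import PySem

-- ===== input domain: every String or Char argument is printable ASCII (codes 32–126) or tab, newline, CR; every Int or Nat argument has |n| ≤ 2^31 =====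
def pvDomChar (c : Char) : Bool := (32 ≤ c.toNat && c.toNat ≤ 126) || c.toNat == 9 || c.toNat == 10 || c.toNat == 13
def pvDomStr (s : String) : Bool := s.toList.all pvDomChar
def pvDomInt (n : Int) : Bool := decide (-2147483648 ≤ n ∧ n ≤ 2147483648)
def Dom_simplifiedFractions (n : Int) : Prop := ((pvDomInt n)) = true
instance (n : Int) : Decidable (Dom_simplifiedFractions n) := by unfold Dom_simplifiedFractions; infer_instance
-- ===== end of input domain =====

-- B replaces the per-pair Euclid gcd test by a per-denominator sieve (mark multiples of every
-- divisor of i, then collect the unmarked numerators); objective: alternative algorithm, same output.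


-- ===== PORT A =====
-- A's nested helper `gcd`: recursion gcd(x, y) = y if x == 0 else gcd(y % x, x), Python `%`
def pyGcd (x y : Int) : Int :=
  if _h : x = 0 then y
  else pyGcd (PySem.Int.mod y x) x
termination_by x.natAbs
decreasing_by
  rcases lt_or_gt_of_ne _h with hx | hx
  · have := PySem.Int.mod_neg_bounds y hx
    omega
  · have h1 := PySem.Int.mod_nonneg y hx
    have h2 := PySem.Int.mod_lt y hx
    omega

def simplifiedFractions (n : Int) : List String :=
  (PySem.List.pyRange 2 (n + 1) 1).foldl
    (fun ans i =>
      (PySem.List.pyRange 1 i 1).foldl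
        (fun ans j =>
          if pyGcd i j = 1 then ans ++ [PySem.Int.toStr j ++ "/" ++ PySem.Int.toStr i]
          else ans)
        ans)
    []

-- ===== PORT B =====
-- B's per-i marking pass: mark = [False]*i; for d in range(2,i): if i % d == 0: for m in range(d,i,d): mark[m] = True
-- (every assigned index m satisfies 0 ≤ d ≤ m < i = len(mark), so `.set m.toNat` is exact here)
def pvMarkRow (i : Int) : List Bool :=
  (PySem.List.pyRange 2 i 1).foldl
    (fun mark d =>
      if PySem.Int.mod i d = 0 then
        (PySem.List.pyRange d i d).foldl (fun mk m => mk.set m.toNat true) mark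
      else mark)
    (List.replicate i.toNat false)

def simplifiedFractions_alt (n : Int) : List String :=
  (PySem.List.pyRange 2 (n + 1) 1).foldl
    (fun ans i =>
      let mark := pvMarkRow i
      (PySem.List.pyRange 1 i 1).foldl
        (fun ans j =>
          if PySem.List.pyGetD mark j false = false then
            ans ++ [PySem.Int.toStr j ++ "/" ++ PySem.Int.toStr i]
          else ans)
        ans)
    []

-- ===== PRECONDITION & SPEC =====
def Spec_simplifiedFractions (n : Int) (out : List String) : Prop := out = simplifiedFractions_alt n
instance (n : Int) (out : List String) : Decidable (Spec_simplifiedFractions n out) := by unfold Spec_simplifiedFractions; infer_instance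

-- ===== CLAIM (what is proved, stated in full; the proofs are below) =====
def Claim_equal_simplifiedFractions : Prop := ∀ (n : Int), Dom_simplifiedFractions n → Spec_simplifiedFractions n (simplifiedFractions n)

-- ===== LEMMAS AND PROOFS =====

-- A's gcd agrees with Nat.gcd on the nonnegative inputs it is called on
lemma pyGcd_natCast (a b : Nat) : pyGcd (a : Int) (b : Int) = (Nat.gcd a b : Int) := by
  induction a using Nat.strong_induction_on generalizing b with
  | _ a ih =>
    rw [pyGcd]
    rcases Nat.eq_zero_or_pos a with ha | ha
    · subst ha; simp
    · have hne : (a : Int) ≠ 0 := by exact_mod_cast Nat.pos_iff_ne_zero.mp ha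
      rw [dif_neg hne, PySem.Int.mod_natCast, ih (b % a) (Nat.mod_lt b ha) a]
      exact congrArg (Nat.cast : Nat → Int) (Nat.gcd_rec a b).symm

-- setting a batch of in-bounds positions to true, read back at j
lemma setFold_length (L : List Int) (mark : List Bool) :
    (L.foldl (fun mk m => mk.set m.toNat true) mark).length = mark.length := by
  induction L generalizing mark with
  | nil => rfl
  | cons m L ih => simpa [List.foldl_cons] using ih (mark.set m.toNat true)

lemma setFold_getD (L : List Int) (mark : List Bool) (j : Nat) (hj : j < mark.length) :
    (L.foldl (fun mk m => mk.set m.toNat true) mark).getD j false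
      = (mark.getD j false || decide (∃ m ∈ L, m.toNat = j)) := by
  induction L generalizing mark with
  | nil => simp
  | cons m L ih =>
    rw [List.foldl_cons, ih (mark.set m.toNat true) (by simpa using hj)]
    by_cases hm : m.toNat = j
    · subst hm
      simp [List.getD_eq_getElem?_getD, hj]
    · have : (mark.set m.toNat true).getD j false = mark.getD j false := by
        simp [List.getD_eq_getElem?_getD, List.getElem?_set_ne hm]
      rw [this]
      by_cases hrest : ∃ x ∈ L, x.toNat = j
      · simp [hrest, hm]
      · simp [hrest, hm]

-- after B's d-loop over L, position j is marked iff it was, or some d ∈ L divides both i and j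
lemma dLoop_getD (i : Int) (L : List Int) (hL : ∀ d ∈ L, 2 ≤ d) (mark : List Bool)
    (j : Nat) (hjlen : j < mark.length) (hji : (j : Int) < i) :
    ((L.foldl (fun mark d =>
        if PySem.Int.mod i d = 0 then
          (PySem.List.pyRange d i d).foldl (fun mk m => mk.set m.toNat true) mark
        else mark) mark).getD j false)
      = (mark.getD j false || decide (0 < j ∧ ∃ d ∈ L, d ∣ i ∧ d ∣ (j : Int))) := by
  induction L generalizing mark with
  | nil => simp
  | cons d L ih =>
    have hd : 2 ≤ d := hL d (by simp)
    rw [List.foldl_cons]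
    by_cases hdvd : PySem.Int.mod i d = 0
    · have hdi : d ∣ i := (PySem.Int.mod_eq_zero_iff_dvd i d).mp hdvd
      rw [if_pos hdvd,
        ih (fun x hx => hL x (by simp [hx]))
          ((PySem.List.pyRange d i d).foldl (fun mk m => mk.set m.toNat true) mark)
          (by rwa [setFold_length]) ,
        setFold_getD _ _ _ hjlen]
      have hmem : (∃ m ∈ PySem.List.pyRange d i d, m.toNat = j) ↔ (0 < j ∧ d ∣ (j : Int)) := by
        constructor
        · rintro ⟨m, hm, rfl⟩
          rw [PySem.List.mem_pyRange_iff_of_pos (by omega)] at hm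
          obtain ⟨h1, h2, h3⟩ := hm
          have hdm : d ∣ m := by simpa using dvd_add h3 (dvd_refl d)
          constructor
          · omega
          · have hc : (m.toNat : Int) = m := by omega
            rw [hc]; exact hdm
        · rintro ⟨hj0, hdj⟩
          refine ⟨(j : Int), ?_, by simp⟩
          rw [PySem.List.mem_pyRange_iff_of_pos (by omega)]
          refine ⟨Int.le_of_dvd (by exact_mod_cast hj0) hdj, hji, ?_⟩
          exact dvd_sub hdj dvd_rfl
      by_cases hj0 : 0 < j
      · by_cases hdj : d ∣ (j : Int)
        · simp [hmem, hj0, hdj, hdi]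
        · simp [hmem, hj0, hdj, hdi]
      · simp [hmem, hj0]
    · rw [if_neg hdvd,
        ih (fun x hx => hL x (by simp [hx])) mark hjlen]
      have hndvd : ¬ d ∣ i := fun hc => hdvd ((PySem.Int.mod_eq_zero_iff_dvd i d).mpr hc)
      by_cases hj0 : 0 < j
      · simp [hndvd, hj0]
      · simp [hj0]

-- final characterisation of B's mark array
lemma markRow_getD (i : Int) (j : Nat) (hj0 : 0 < j) (hji : (j : Int) < i) :
    PySem.List.pyGetD (pvMarkRow i) (j : Int) false
      = decide (∃ d ∈ PySem.List.pyRange 2 i 1, d ∣ i ∧ d ∣ (j : Int)) := by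
  rw [PySem.List.pyGetD_natCast, pvMarkRow,
    dLoop_getD i _ (fun d hd => (PySem.List.mem_pyRange_one.mp hd).1) _ j
      (by simp [List.length_replicate]; omega) hji]
  have hrep : (List.replicate i.toNat false).getD j false = false := by
    simp [List.getD_eq_getElem?_getD, hji]
  rw [hrep, Bool.false_or]
  congr 1
  simp only [eq_iff_iff]
  constructor
  · rintro ⟨-, d, hd, hdi, hdj⟩
    exact ⟨d, hd, hdi, hdj⟩
  · rintro ⟨d, hd, hdi, hdj⟩
    exact ⟨hj0, d, hd, hdi, hdj⟩

-- the arithmetic heart: for 1 ≤ j < i, gcd(i, j) = 1 iff no d with 2 ≤ d < i divides both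
lemma gcd_eq_one_iff (i j : Int) (hi : 2 ≤ i) (hj : 1 ≤ j) (hji : j < i) :
    pyGcd i j = 1 ↔ ¬ ∃ d : Int, 2 ≤ d ∧ d < i ∧ d ∣ i ∧ d ∣ j := by
  have hi' : i = (i.toNat : Int) := by omega
  have hj' : j = (j.toNat : Int) := by omega
  rw [hi', hj', pyGcd_natCast]
  set a := i.toNat with ha
  set b := j.toNat with hb
  have ha2 : 2 ≤ a := by omega
  have hb1 : 1 ≤ b := by omega
  have hba : b < a := by omega
  constructor
  · rintro hg ⟨d, hd2, hdlt, hdi, hdj⟩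
    have hdeq : d = (d.toNat : Int) := by omega
    rw [hdeq] at hdi hdj
    have h1 : d.toNat ∣ a := by exact_mod_cast hdi
    have h2 : d.toNat ∣ b := by exact_mod_cast hdj
    have hdg : d.toNat ∣ Nat.gcd a b := Nat.dvd_gcd h1 h2
    have hg1 : Nat.gcd a b = 1 := by exact_mod_cast hg
    rw [hg1] at hdg
    have := Nat.le_of_dvd (by norm_num) hdg
    omega
  · intro hno
    by_contra hg
    have hgne : Nat.gcd a b ≠ 0 := Nat.gcd_ne_zero_left (by omega)
    have hg2 : 2 ≤ Nat.gcd a b := by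
      have : Nat.gcd a b ≠ 1 := by
        intro hc
        exact hg (by exact_mod_cast congrArg (Nat.cast : Nat → Int) hc)
      omega
    have hgb : Nat.gcd a b ≤ b := Nat.le_of_dvd (by omega) (Nat.gcd_dvd_right a b)
    exact hno ⟨(Nat.gcd a b : Int), by exact_mod_cast hg2, by omega,
      by exact_mod_cast Nat.gcd_dvd_left a b, by exact_mod_cast Nat.gcd_dvd_right a b⟩

-- per-denominator rows agree
lemma row_eq (i : Int) (hi : 2 ≤ i) (acc : List String) :
    (PySem.List.pyRange 1 i 1).foldl
      (fun ans j =>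
        if pyGcd i j = 1 then ans ++ [PySem.Int.toStr j ++ "/" ++ PySem.Int.toStr i]
        else ans) acc
    = (PySem.List.pyRange 1 i 1).foldl
      (fun ans j =>
        if PySem.List.pyGetD (pvMarkRow i) j false = false then
          ans ++ [PySem.Int.toStr j ++ "/" ++ PySem.Int.toStr i]
        else ans) acc := by
  rw [PySem.List.foldl_append_ite (fun j => pyGcd i j = 1),
    PySem.List.foldl_append_ite (fun j => PySem.List.pyGetD (pvMarkRow i) j false = false)]
  congr 1
  congr 1
  apply List.filter_congr
  intro j hjmem
  obtain ⟨hj1, hji⟩ := PySem.List.mem_pyRange_one.mp hjmem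
  have hj' : j = ((j.toNat : Nat) : Int) := by omega
  have hmark : PySem.List.pyGetD (pvMarkRow i) j false
      = decide (∃ d ∈ PySem.List.pyRange 2 i 1, d ∣ i ∧ d ∣ j) := by
    rw [hj']
    exact markRow_getD i j.toNat (by omega) (by omega)
  have hiff : (∃ d ∈ PySem.List.pyRange 2 i 1, d ∣ i ∧ d ∣ j)
      ↔ (∃ d : Int, 2 ≤ d ∧ d < i ∧ d ∣ i ∧ d ∣ j) := by
    constructor
    · rintro ⟨d, hd, hdi, hdj⟩
      exact ⟨d, (PySem.List.mem_pyRange_one.mp hd).1, (PySem.List.mem_pyRange_one.mp hd).2, hdi, hdj⟩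
    · rintro ⟨d, h2, hlt, hdi, hdj⟩
      exact ⟨d, PySem.List.mem_pyRange_one.mpr ⟨h2, hlt⟩, hdi, hdj⟩
  have hgcd := gcd_eq_one_iff i j hi hj1 hji
  by_cases h : ∃ d ∈ PySem.List.pyRange 2 i 1, d ∣ i ∧ d ∣ j
  · simp [hmark, hgcd, hiff.mp h]
  · simp [hmark, hgcd]

-- ===== VERDICT (by name: the statement is the Claim_ definition above) =====
theorem simplifiedFractions_spec : Claim_equal_simplifiedFractions := by
  intro n _
  unfold Spec_simplifiedFractions simplifiedFractions simplifiedFractions_alt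
  apply PySem.List.foldl_congr_mem
  intro acc i hi
  obtain ⟨hi2, -⟩ := PySem.List.mem_pyRange_one.mp hi
  exact row_eq i hi2 acc
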